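-- pv_equiv track=rewrite | github.com/lewisian8787/rag_soccer | backend/embedding/embed_reports.py | chunk_qa
-- ===== SOURCE A (Python) =====
-- QA_QUESTION_MAX_TOKENS = 40
--
-- def estimate_tokens(text):
--     return len(text) // 4
--
-- def _is_question_para(para):
--     """Returns True if a paragraph looks like an interview question."""
--     return para.strip().endswith("?") and estimate_tokens(para) < QA_QUESTION_MAX_TOKENS
--
-- QA_MAX_TOKENS = 400
--
-- def chunk_qa(body):
--     paragraphs = [p.strip() for p in body.split("\n\n") if p.strip()]
--     chunks = []
--     current_question = ""
--     current_answer_paras = []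
--
--     def flush(question, answer_paras):
--         if not answer_paras:
--             return
--         answer = " ".join(answer_paras)
--         if estimate_tokens((question + " " + answer).strip()) <= QA_MAX_TOKENS:
--             chunks.append((question + " " + answer).strip())
--         else:
--             # Answer is too long — split at paragraph boundaries, prepend question each time
--             buffer = ""
--             for para in answer_paras:
--                 candidate = (buffer + " " + para).strip()
--                 if estimate_tokens(candidate) <= QA_MAX_TOKENS:
--                     buffer = candidate
--                 else:
--                     if buffer:
--                         chunks.append((question + " " + buffer).strip())
--                     buffer = para
--             if buffer:
--                 chunks.append((question + " " + buffer).strip())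
--
--     for para in paragraphs:
--         if _is_question_para(para):
--             flush(current_question, current_answer_paras)
--             current_question = para
--             current_answer_paras = []
--         else:
--             current_answer_paras.append(para)
--
--     flush(current_question, current_answer_paras)
--     return chunks
-- ===== SOURCE B (Python) =====
-- QA_QUESTION_MAX_TOKENS = 40
-- QA_MAX_TOKENS = 400
-- # len(s) // 4 <= QA_MAX_TOKENS  iff  len(s) <= CHAR_LIMIT
-- CHAR_LIMIT = QA_MAX_TOKENS * 4 + 3
--
--
-- def estimate_tokens(text):
--     return len(text) // 4
--
--
-- def _is_question_para(para):
--     return para.strip().endswith("?") and estimate_tokens(para) < QA_QUESTION_MAX_TOKENS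
--
--
-- def _emit(question, answers):
--     """Chunks for one nonempty run of answer paragraphs under one question.
--
--     Works with character counts and index arithmetic: no growing buffer string,
--     no re-stripping; cut points are found on lengths alone."""
--     head = question + " " if question else ""
--     whole = " ".join(answers)
--     if len(head) + len(whole) <= CHAR_LIMIT:
--         return [head + whole]
--     chunks = []
--     i = 0
--     n = len(answers)
--     while i < n:
--         total = len(answers[i])
--         j = i + 1
--         while j < n and total + 1 + len(answers[j]) <= CHAR_LIMIT:
--             total += 1 + len(answers[j])
--             j += 1
--         chunks.append(head + " ".join(answers[i:j]))
--         i = j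
--     return chunks
--
--
-- def chunk_qa(body):
--     paragraphs = [p.strip() for p in body.split("\n\n") if p.strip()]
--     out = []
--     question = ""
--     i = 0
--     n = len(paragraphs)
--     while i < n:
--         if _is_question_para(paragraphs[i]):
--             question = paragraphs[i]
--             i += 1
--             continue
--         j = i + 1
--         while j < n and not _is_question_para(paragraphs[j]):
--             j += 1
--         out += _emit(question, paragraphs[i:j])
--         i = j
--     return out
-- ===== Notes on version B (the rewrite author's own statement) =====
-- stated objective: alternative
-- what changed: Replaces A's streaming loop with its nested flush closure and growing buffer string by index arithmetic over character counts: a scan that consumes each maximal run of answer paragraphs at once and a packer that finds every cut point from the paragraph lengths alone (total+1+len <= 1603 chars, the character form of the 400-token bound) and then joins each slice once, with no incremental buffer concatenation and no re-stripping.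
import Mathlib
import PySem

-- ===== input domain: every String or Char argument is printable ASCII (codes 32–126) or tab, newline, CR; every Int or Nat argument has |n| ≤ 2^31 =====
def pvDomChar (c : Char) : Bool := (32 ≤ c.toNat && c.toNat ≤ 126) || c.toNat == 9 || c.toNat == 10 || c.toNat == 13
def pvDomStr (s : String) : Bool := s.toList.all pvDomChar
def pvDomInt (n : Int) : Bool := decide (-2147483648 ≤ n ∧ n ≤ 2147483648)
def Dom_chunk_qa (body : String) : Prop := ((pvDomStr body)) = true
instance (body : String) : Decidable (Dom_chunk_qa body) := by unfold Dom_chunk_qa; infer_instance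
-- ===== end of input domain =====

-- B replaces A's streaming loop + nested flush closure by index arithmetic over character
-- counts: a scan that consumes a whole run of answer paragraphs at once and a packer that
-- finds each cut point from paragraph lengths alone (no growing buffer string, no
-- re-stripping); same asymptotic cost, different algorithmic decomposition (objective: alternative).


-- shared module-level helpers (both Python files define them identically)
def pvTokens (t : String) : Int := PySem.Int.floordiv (PySem.Str.len t) 4

def pvIsQuestion (p : String) : Bool :=
  PySem.Str.endswith (PySem.Str.strip p) "?" && decide (pvTokens p < 40)

def pvParagraphs (body : String) : List String :=
  (((PySem.Str.split? body "\n\n").getD []).map PySem.Str.strip).filter (fun s => s ≠ "")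

-- ===== PORT A =====
-- flush's else-branch loop: walks answer_paras with the buffer, appending chunks
def pvFlushLoop (q : String) (paras : List String) (buffer : String) : List String :=
  match paras with
  | [] => if buffer ≠ "" then [PySem.Str.strip (q ++ " " ++ buffer)] else []
  | p :: rest =>
    let candidate := PySem.Str.strip (buffer ++ " " ++ p)
    if pvTokens candidate ≤ 400 then pvFlushLoop q rest candidate
    else (if buffer ≠ "" then [PySem.Str.strip (q ++ " " ++ buffer)] else []) ++ pvFlushLoop q rest p

-- flush(question, answer_paras): the list of chunks it appends
def pvFlush (q : String) (paras : List String) : List String :=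
  if paras = [] then []
  else
    let answer := PySem.Str.join " " paras
    if pvTokens (PySem.Str.strip (q ++ " " ++ answer)) ≤ 400 then
      [PySem.Str.strip (q ++ " " ++ answer)]
    else pvFlushLoop q paras ""

-- the main for-loop over paragraphs, state = (chunks, current_question, current_answer_paras)
def pvLoopA (paras : List String) (chunks : List String) (q : String) (acc : List String) :
    List String :=
  match paras with
  | [] => chunks ++ pvFlush q acc
  | p :: rest =>
    if pvIsQuestion p then pvLoopA rest (chunks ++ pvFlush q acc) p []
    else pvLoopA rest chunks q (acc ++ [p])

def chunk_qa (body : String) : List String :=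
  pvLoopA (pvParagraphs body) [] "" []

-- ===== PORT B =====
-- _emit's inner while: how many further paragraphs still fit, from lengths alone
-- (CHAR_LIMIT = QA_MAX_TOKENS * 4 + 3 = 1603)
def pvCut (total : Int) (rest : List String) : Nat :=
  match rest with
  | [] => 0
  | p :: tl =>
    if total + 1 + PySem.Str.len p ≤ 1603 then pvCut (total + 1 + PySem.Str.len p) tl + 1
    else 0

-- _emit's outer while: one chunk per cut point, by take/drop index arithmetic
def pvPackB (head : String) (answers : List String) : List String :=
  match answers with
  | [] => []
  | p :: tl =>
    let k := pvCut (PySem.Str.len p) tl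
    (head ++ PySem.Str.join " " (p :: tl.take k)) :: pvPackB head (tl.drop k)
termination_by answers.length
decreasing_by simp [List.length_drop]

-- _emit(question, answers)
def pvEmitB (q : String) (answers : List String) : List String :=
  let head := if q ≠ "" then q ++ " " else ""
  let whole := PySem.Str.join " " answers
  if PySem.Str.len head + PySem.Str.len whole ≤ 1603 then [head ++ whole]
  else pvPackB head answers

-- the main while loop: advance over a question, or over a maximal run of answers at once
def pvScan (q : String) (paras : List String) : List String :=
  match paras with
  | [] => []
  | p :: tl =>
    if pvIsQuestion p then pvScan p tl
    else pvEmitB q (p :: tl.takeWhile (fun x => !pvIsQuestion x))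
         ++ pvScan q (tl.dropWhile (fun x => !pvIsQuestion x))
termination_by paras.length
decreasing_by
  · simp
  · have := List.length_dropWhile_le (fun x => !pvIsQuestion x) tl
    simp; omega

def chunk_qa_alt (body : String) : List String :=
  pvScan "" (pvParagraphs body)

-- ===== PRECONDITION & SPEC =====
def Spec_chunk_qa (body : String) (out : List String) : Prop := out = chunk_qa_alt body
instance (body : String) (out : List String) : Decidable (Spec_chunk_qa body out) := by unfold Spec_chunk_qa; infer_instance

-- ===== CLAIM (what is proved, stated in full; the proofs are below) =====
def Claim_equal_chunk_qa : Prop := ∀ (body : String), Dom_chunk_qa body → Spec_chunk_qa body (chunk_qa body)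

-- ===== LEMMAS AND PROOFS =====

-- a "clean" string: nonempty and fixed by strip (every kept paragraph is clean)
def SClean (s : String) : Prop := s ≠ "" ∧ PySem.Str.strip s = s

-- abbreviation used only in proofs: B's question prefix
def pvHead (q : String) : String := if q ≠ "" then q ++ " " else ""

theorem pv_dropWhile_append {p : Char → Bool} {x : List Char} (y : List Char)
    (h : List.dropWhile p x = x) (hx : x ≠ []) : List.dropWhile p (x ++ y) = x ++ y := by
  cases x with
  | nil => simp at hx
  | cons c t =>
    rw [List.dropWhile_cons] at h
    rw [List.cons_append, List.dropWhile_cons]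
    split_ifs at h ⊢ with hc
    · exfalso
      have h1 := congrArg List.length h
      have h2 := List.length_dropWhile_le p t
      simp at h1; omega
    · rfl

theorem pv_sclean_fix {s : String} (h : SClean s) :
    List.dropWhile PySem.Chars.isspace s.toList = s.toList ∧
    List.dropWhile PySem.Chars.isspace s.toList.reverse = s.toList.reverse := by
  obtain ⟨hne, hs⟩ := h
  have hl : (PySem.Str.strip s).toList = s.toList := by rw [hs]
  rw [PySem.Str.toList_strip] at hl
  unfold PySem.Chars.strip PySem.Chars.rstrip PySem.Chars.lstrip at hl
  -- let L = lstrip; the composite has length ≤ L length ≤ orig; equality forces both fixes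
  have h1 := List.length_dropWhile_le PySem.Chars.isspace s.toList
  have h2 := List.length_dropWhile_le PySem.Chars.isspace
      (List.dropWhile PySem.Chars.isspace s.toList).reverse
  rw [List.length_reverse] at h2
  have hlen := congrArg List.length hl
  rw [List.length_reverse] at hlen
  have hfix1 : List.dropWhile PySem.Chars.isspace s.toList = s.toList :=
    (List.dropWhile_suffix _).eq_of_length (by omega)
  constructor
  · exact hfix1
  · rw [hfix1] at hl
    have := congrArg List.reverse hl
    simpa using this


theorem pv_strip_glue_chars (al bl : List Char)
    (ha1 : List.dropWhile PySem.Chars.isspace al = al) (ha2 : al ≠ [])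
    (hb2 : List.dropWhile PySem.Chars.isspace bl.reverse = bl.reverse) (hbne : bl ≠ []) :
    PySem.Chars.strip (al ++ ' ' :: bl) = al ++ ' ' :: bl := by
  unfold PySem.Chars.strip PySem.Chars.rstrip PySem.Chars.lstrip
  rw [pv_dropWhile_append (' ' :: bl) ha1 ha2]
  have hrev : (al ++ ' ' :: bl).reverse = bl.reverse ++ ' ' :: al.reverse := by
    simp
  rw [hrev, pv_dropWhile_append (' ' :: al.reverse) hb2 (by simpa using hbne)]
  rw [← hrev, List.reverse_reverse]

theorem pv_sclean_append {a b : String} (ha : SClean a) (hb : SClean b) :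
    SClean (a ++ " " ++ b) := by
  have hfa := pv_sclean_fix ha
  have hfb := pv_sclean_fix hb
  have hane : a.toList ≠ [] := by
    intro h; exact ha.1 (String.toList_inj.mp (by simpa using h))
  have hbne : b.toList ≠ [] := by
    intro h; exact hb.1 (String.toList_inj.mp (by simpa using h))
  have hts : (a ++ " " ++ b).toList = a.toList ++ ' ' :: b.toList := by
    simp [String.toList_append]
  constructor
  · intro h
    have := congrArg String.toList h
    rw [hts] at this
    simp at this
  · apply String.toList_inj.mp
    rw [PySem.Str.toList_strip, hts, pv_strip_glue_chars _ _ hfa.1 hane hfb.2 hbne]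

theorem pv_strip_space (b : String) (hb : SClean b) :
    PySem.Str.strip (" " ++ b) = b := by
  have hfb := pv_sclean_fix hb
  apply String.toList_inj.mp
  rw [PySem.Str.toList_strip]
  have : (" " ++ b).toList = ' ' :: b.toList := by simp [String.toList_append]
  rw [this]
  unfold PySem.Chars.strip PySem.Chars.rstrip PySem.Chars.lstrip
  rw [List.dropWhile_cons]
  simp only [show PySem.Chars.isspace ' ' = true from by decide, if_true]
  rw [hfb.1, hfb.2, List.reverse_reverse]

theorem pv_strip_head {q b : String} (hq : q = "" ∨ SClean q) (hb : SClean b) :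
    PySem.Str.strip (q ++ " " ++ b) = pvHead q ++ b := by
  rcases hq with hq | hq
  · subst hq
    rw [String.empty_append, pv_strip_space b hb]
    simp [pvHead]
  · rw [(pv_sclean_append hq hb).2]
    simp [pvHead, hq.1, String.append_assoc]

theorem pv_strip_idem (s : String) : PySem.Str.strip (PySem.Str.strip s) = PySem.Str.strip s := by
  by_cases hne : PySem.Str.strip s = ""
  · rw [hne]; decide
  · apply String.toList_inj.mp
    rw [PySem.Str.toList_strip, PySem.Str.toList_strip]
    set l := s.toList
    have hne' : PySem.Chars.strip l ≠ [] := by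
      intro h
      apply hne
      apply String.toList_inj.mp
      rw [PySem.Str.toList_strip, h]; rfl
    unfold PySem.Chars.strip PySem.Chars.rstrip PySem.Chars.lstrip at hne' ⊢
    set y := List.dropWhile PySem.Chars.isspace l with hy
    set z := (List.dropWhile PySem.Chars.isspace y.reverse).reverse with hz
    have hzne : z ≠ [] := hne'
    have hyfix : List.dropWhile PySem.Chars.isspace y = y := List.dropWhile_idempotent _ _
    have hzrevfix : List.dropWhile PySem.Chars.isspace z.reverse = z.reverse := by
      rw [hz, List.reverse_reverse]
      exact List.dropWhile_idempotent _ _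
    have hzy : z <+: y := by
      have h1 : z <+: y.reverse.reverse :=
        List.reverse_prefix.mpr (List.dropWhile_suffix (l := y.reverse) PySem.Chars.isspace)
      simpa using h1
    have hzfix : List.dropWhile PySem.Chars.isspace z = z := by
      rw [List.dropWhile_eq_self_iff]
      intro hl
      have h0 := hzy.getElem (i := 0) hl
      rw [h0]
      have := (List.dropWhile_eq_self_iff).mp hyfix
      exact this (lt_of_lt_of_le hl hzy.length_le)
    rw [hzfix, hzrevfix, List.reverse_reverse]

theorem pv_paras_clean {body : String} {p : String} (hp : p ∈ pvParagraphs body) : SClean p := by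
  unfold pvParagraphs at hp
  rw [List.mem_filter] at hp
  obtain ⟨hm, hne⟩ := hp
  rw [List.mem_map] at hm
  obtain ⟨raw, _, rfl⟩ := hm
  refine ⟨by simpa using hne, pv_strip_idem raw⟩

theorem pv_join_cons_cons (p x : String) (r : List String) :
    PySem.Str.join " " (p :: x :: r) = p ++ " " ++ PySem.Str.join " " (x :: r) := by
  apply String.toList_inj.mp
  rw [PySem.Str.toList_join]
  simp only [List.map_cons]
  rw [show (" " : String).toList = [' '] from rfl, PySem.Chars.join_cons_cons]
  rw [String.toList_append, String.toList_append, PySem.Str.toList_join]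
  rfl

theorem pv_foldl_glue (r : List String) : ∀ (a b : String),
    b ++ " " ++ r.foldl (fun s x => s ++ " " ++ x) a = r.foldl (fun s x => s ++ " " ++ x) (b ++ " " ++ a) := by
  induction r with
  | nil => intro a b; rfl
  | cons x t ih =>
    intro a b
    simp only [List.foldl_cons]
    rw [ih]
    congr 1
    simp [String.append_assoc]

theorem pv_join_foldl (p : String) (xs : List String) :
    PySem.Str.join " " (p :: xs) = xs.foldl (fun s x => s ++ " " ++ x) p := by
  induction xs generalizing p with
  | nil =>
    apply String.toList_inj.mp
    rw [PySem.Str.toList_join]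
    simp [PySem.Chars.join_singleton]
  | cons x r ih =>
    rw [pv_join_cons_cons, ih x, List.foldl_cons, pv_foldl_glue]

theorem pv_foldl_clean {p : String} {xs : List String} (hp : SClean p)
    (hxs : ∀ x ∈ xs, SClean x) : SClean (xs.foldl (fun s x => s ++ " " ++ x) p) := by
  induction xs generalizing p with
  | nil => exact hp
  | cons x t ih =>
    exact ih (pv_sclean_append hp (hxs x (by simp))) (fun y hy => hxs y (by simp [hy]))


theorem pv_tok_iff {t : String} : (pvTokens t ≤ 400) ↔ (PySem.Str.len t ≤ 1603) := by
  unfold pvTokens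
  rw [PySem.Int.floordiv_eq_ediv_of_pos (by norm_num), PySem.Str.len_eq]
  omega

theorem pv_len_glue (a b : String) : PySem.Str.len (a ++ " " ++ b) = PySem.Str.len a + 1 + PySem.Str.len b := by
  rw [PySem.Str.len_append, PySem.Str.len_append, show PySem.Str.len " " = 1 from by decide]

-- the packing loops agree: A's buffer walk = B's cut-point recursion
theorem pv_flushLoop_eq_pack {q : String} (hq : q = "" ∨ SClean q) :
    ∀ (rest : List String) (b : String), SClean b → (∀ x ∈ rest, SClean x) →
    pvFlushLoop q rest b =
      (pvHead q ++ (rest.take (pvCut (PySem.Str.len b) rest)).foldl (fun s x => s ++ " " ++ x) b)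
        :: pvPackB (pvHead q) (rest.drop (pvCut (PySem.Str.len b) rest)) := by
  intro rest
  induction rest with
  | nil =>
    intro b hb _
    simp only [pvFlushLoop, pvCut, List.take_nil, List.drop_nil, List.foldl_nil, pvPackB]
    rw [if_pos hb.1, pv_strip_head hq hb]
  | cons p tl ih =>
    intro b hb hcl
    have hp : SClean p := hcl p (by simp)
    have hcand : PySem.Str.strip (b ++ " " ++ p) = b ++ " " ++ p := (pv_sclean_append hb hp).2
    have hlen : PySem.Str.len (b ++ " " ++ p) = PySem.Str.len b + 1 + PySem.Str.len p :=
      pv_len_glue b p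
    simp only [pvFlushLoop, pvCut, hcand]
    by_cases hfit : PySem.Str.len b + 1 + PySem.Str.len p ≤ 1603
    · rw [if_pos (by rw [pv_tok_iff, hlen]; exact hfit), if_pos hfit]
      rw [ih (b ++ " " ++ p) (pv_sclean_append hb hp) (fun x hx => hcl x (by simp [hx]))]
      rw [hlen]
      simp [List.foldl_cons]
    · rw [if_neg (by rw [pv_tok_iff, hlen]; exact hfit), if_neg hfit]
      rw [if_pos hb.1, pv_strip_head hq hb]
      rw [ih p hp (fun x hx => hcl x (by simp [hx]))]
      simp only [List.take_zero, List.foldl_nil, List.drop_zero, pvPackB]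
      rw [pv_join_foldl]
      rfl

theorem pv_flushLoop_start {q : String} (p : String) (tl : List String) (hp : SClean p) :
    pvFlushLoop q (p :: tl) "" = pvFlushLoop q tl p := by
  have hcand : PySem.Str.strip ("" ++ " " ++ p) = p := by
    rw [String.empty_append, pv_strip_space p hp]
  simp only [pvFlushLoop, hcand]
  split_ifs <;> simp_all

theorem pv_flush_eq_emit {q : String} (hq : q = "" ∨ SClean q) {ans : List String}
    (hne : ans ≠ []) (hcl : ∀ x ∈ ans, SClean x) : pvFlush q ans = pvEmitB q ans := by
  cases ans with
  | nil => exact absurd rfl hne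
  | cons p tl =>
    have hp : SClean p := hcl p (by simp)
    have hjoin : SClean (PySem.Str.join " " (p :: tl)) := by
      rw [pv_join_foldl]
      exact pv_foldl_clean hp (fun x hx => hcl x (by simp [hx]))
    have hstrip : PySem.Str.strip (q ++ " " ++ PySem.Str.join " " (p :: tl))
        = pvHead q ++ PySem.Str.join " " (p :: tl) := pv_strip_head hq hjoin
    have hcond : (pvTokens (PySem.Str.strip (q ++ " " ++ PySem.Str.join " " (p :: tl))) ≤ 400)
        ↔ (PySem.Str.len (pvHead q) + PySem.Str.len (PySem.Str.join " " (p :: tl)) ≤ 1603) := by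
      rw [hstrip, pv_tok_iff, PySem.Str.len_append]
    simp only [pvFlush, pvEmitB, if_neg (by simp : ¬(p :: tl = []))]
    show (if pvTokens (PySem.Str.strip (q ++ " " ++ PySem.Str.join " " (p :: tl))) ≤ 400 then _ else _) = _
    by_cases hfit : PySem.Str.len (pvHead q) + PySem.Str.len (PySem.Str.join " " (p :: tl)) ≤ 1603
    · rw [if_pos (hcond.mpr hfit)]
      show _ = if _ then _ else _
      rw [if_pos (show PySem.Str.len (if q ≠ "" then q ++ " " else "") + _ ≤ 1603 from hfit), hstrip]
      rfl
    · rw [if_neg (fun h => hfit (hcond.mp h))]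
      show _ = if _ then _ else _
      rw [if_neg (show ¬(PySem.Str.len (if q ≠ "" then q ++ " " else "") + _ ≤ 1603) from hfit)]
      rw [pv_flushLoop_start p tl hp,
        pv_flushLoop_eq_pack hq tl p hp (fun x hx => hcl x (by simp [hx]))]
      simp only [pvPackB]
      rw [pv_join_foldl]
      rfl

theorem pv_scan_unfold {q : String} (hq : q = "" ∨ SClean q) (paras : List String)
    (hcl : ∀ x ∈ paras, SClean x) :
    pvScan q paras =
      pvFlush q (paras.takeWhile (fun x => !pvIsQuestion x))
        ++ pvScan q (paras.dropWhile (fun x => !pvIsQuestion x)) := by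
  cases paras with
  | nil => simp [pvScan, pvFlush]
  | cons p tl =>
    by_cases hqp : pvIsQuestion p
    · simp [pvScan, pvFlush, hqp]
    · have hne : (p :: tl.takeWhile (fun x => !pvIsQuestion x)) ≠ [] := by simp
      have hcl' : ∀ x ∈ p :: tl.takeWhile (fun x => !pvIsQuestion x), SClean x := by
        intro x hx
        rcases List.mem_cons.mp hx with rfl | hx
        · exact hcl x (by simp)
        · exact hcl x (List.mem_cons_of_mem _ ((tl.takeWhile_sublist _).subset hx))
      simp [pvScan, hqp, pv_flush_eq_emit hq hne hcl']

theorem pv_loopA_eq_scan (paras : List String) :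
    ∀ (chunks : List String) (q : String) (acc : List String),
    (q = "" ∨ SClean q) → (∀ x ∈ paras, SClean x) → (∀ x ∈ acc, SClean x) →
    pvLoopA paras chunks q acc =
      chunks ++ pvFlush q (acc ++ paras.takeWhile (fun x => !pvIsQuestion x))
        ++ pvScan q (paras.dropWhile (fun x => !pvIsQuestion x)) := by
  induction paras with
  | nil =>
    intro chunks q acc _ _ _
    simp [pvLoopA, pvScan]
  | cons p tl ih =>
    intro chunks q acc hq hcl hacc
    have hp : SClean p := hcl p (by simp)
    have hcltl : ∀ x ∈ tl, SClean x := fun x hx => hcl x (by simp [hx])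
    by_cases hqp : pvIsQuestion p
    · have hscan : pvScan p tl =
          pvFlush p (tl.takeWhile (fun x => !pvIsQuestion x))
            ++ pvScan p (tl.dropWhile (fun x => !pvIsQuestion x)) :=
        pv_scan_unfold (Or.inr hp) tl hcltl
      have hrhs : pvScan q (p :: tl) = pvScan p tl := by simp [pvScan, hqp]
      simp only [pvLoopA, if_pos hqp]
      rw [ih (chunks ++ pvFlush q acc) p [] (Or.inr hp) hcltl (by simp)]
      rw [List.nil_append, List.append_assoc (chunks ++ pvFlush q acc), ← hscan]
      simp [hqp, hrhs, List.append_assoc]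
    · simp only [pvLoopA, List.takeWhile_cons, List.dropWhile_cons, hqp,
        Bool.not_false]
      rw [ih chunks q (acc ++ [p]) hq hcltl
        (by intro x hx; rcases List.mem_append.mp hx with h | h
            · exact hacc x h
            · simp at h; subst h; exact hp)]
      simp [List.append_assoc]

-- ===== VERDICT (by name: the statement is the Claim_ definition above) =====
theorem chunk_qa_spec : Claim_equal_chunk_qa := by
  intro body _
  unfold Spec_chunk_qa chunk_qa chunk_qa_alt
  have hcl : ∀ x ∈ pvParagraphs body, SClean x := fun x hx => pv_paras_clean hx
  rw [pv_loopA_eq_scan _ _ _ _ (Or.inl rfl) hcl (by simp),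
    pv_scan_unfold (Or.inl rfl) _ hcl]
  simp
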